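-- pv_equiv track=rewrite | github.com/OvidM/SnakeAI | SnakeAI.py | celuleDeLangaSarpe
-- ===== SOURCE A (Python) =====
-- def celuleDeLangaSarpe(sarpe):
--   listaDeCelule = []
--   capX = sarpe[0]['x']
--   capY = sarpe[0]['y']
--   count = 0
--   for each in sarpe:
--     if count == 0:
--       listaDeCelule.append(each)
--     else:
--       dist = abs (each['x'] - capX) + abs(each['y']-capY)
--       nrDinSpate = len(sarpe) - count
--       if dist < (nrDinSpate+1):
--         listaDeCelule.append(each)
--         listaDeCelule.append({'x':each['x']+1,'y':each['y']})
--         listaDeCelule.append({'x':each['x']-1,'y':each['y']})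
--         listaDeCelule.append({'x':each['x'],'y':each['y']+1})
--         listaDeCelule.append({'x':each['x'],'y':each['y']-1})
--         listaDeCelule.append({'x':each['x']+1,'y':each['y']+1})
--         listaDeCelule.append({'x':each['x']-1,'y':each['y']-1})
--         listaDeCelule.append({'x':each['x']-1,'y':each['y']+1})
--         listaDeCelule.append({'x':each['x']+1,'y':each['y']-1})
--     count = count + 1
--   seen = set()
--   newList = []
--   for d in listaDeCelule:
--     t = tuple(d.items())
--     if t not in seen:
--         seen.add(t)
--         newList.append(d)
--   return newList
-- ===== SOURCE B (Python) =====
-- def celuleDeLangaSarpe(sarpe):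
--     capX = sarpe[0]['x']
--     capY = sarpe[0]['y']
--     n = len(sarpe)
--     offsets = [(1, 0), (-1, 0), (0, 1), (0, -1),
--                (1, 1), (-1, -1), (-1, 1), (1, -1)]
--     # stage 1: candidate stream as one comprehension (head, then each
--     # qualifying segment followed by its 8 neighbor cells)
--     cands = [sarpe[0]] + [
--         cell
--         for i, d in enumerate(sarpe)
--         if i and abs(d['x'] - capX) + abs(d['y'] - capY) < n - i + 1
--         for cell in [d] + [{'x': d['x'] + dx, 'y': d['y'] + dy}
--                            for dx, dy in offsets]
--     ]
--     # stage 2: dedup by repeated filtering (nub): take the head, drop all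
--     # of its later duplicates from the remainder, repeat -- no seen set
--     out = []
--     while cands:
--         h = cands[0]
--         hk = tuple(h.items())
--         out.append(h)
--         cands = [d for d in cands[1:] if tuple(d.items()) != hk]
--     return out
-- ===== Notes on version B (the rewrite author's own statement) =====
-- stated objective: alternative
-- what changed: Replaces A's seen-set dedup pass by a nub algorithm (repeatedly take the head and filter its later duplicates out of the remainder, with no auxiliary set), and builds the candidate stream as one comprehension over an offsets table instead of A's nine explicit appends.
import Mathlib
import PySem

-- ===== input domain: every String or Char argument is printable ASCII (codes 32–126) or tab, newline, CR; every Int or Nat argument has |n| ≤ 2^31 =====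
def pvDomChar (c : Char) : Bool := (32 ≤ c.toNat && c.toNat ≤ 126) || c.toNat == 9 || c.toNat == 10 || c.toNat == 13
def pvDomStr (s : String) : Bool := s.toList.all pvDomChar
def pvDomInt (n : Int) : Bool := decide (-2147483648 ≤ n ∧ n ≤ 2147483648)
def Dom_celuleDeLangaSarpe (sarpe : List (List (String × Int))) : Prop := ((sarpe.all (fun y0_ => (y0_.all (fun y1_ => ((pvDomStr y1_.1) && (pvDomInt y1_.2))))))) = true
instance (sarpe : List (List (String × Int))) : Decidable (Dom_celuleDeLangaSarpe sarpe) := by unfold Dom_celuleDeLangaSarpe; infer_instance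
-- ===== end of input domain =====

-- B replaces A's seen-set dedup by a repeated-filtering nub and builds the candidates as one comprehension over an offsets table; equivalence of return values.

-- d['k'] : first-match lookup in the association list (exact for a Python dict under the convention; the default is never reached under Pre_)
def dget (d : List (String × Int)) (k : String) : Int :=
  ((d.find? (fun p => p.1 == k)).map Prod.snd).getD 0

-- ===== PORT A =====
-- first loop of A: builds listaDeCelule (count is Python's running counter)
def aCollect (capX capY n : Int) : List (List (String × Int)) → Int → List (List (String × Int))
  | [], _ => []
  | each :: rest, count =>
    (if count = 0 then [each]
     else
       let x := dget each "x"
       let y := dget each "y"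
       if |x - capX| + |y - capY| < (n - count) + 1 then
         [each,
          [("x", x + 1), ("y", y)], [("x", x - 1), ("y", y)],
          [("x", x), ("y", y + 1)], [("x", x), ("y", y - 1)],
          [("x", x + 1), ("y", y + 1)], [("x", x - 1), ("y", y - 1)],
          [("x", x - 1), ("y", y + 1)], [("x", x + 1), ("y", y - 1)]]
       else []) ++ aCollect capX capY n rest (count + 1)

-- second loop of A: dedup keyed by tuple(d.items()) (= the assoc list itself)
def aDedup (seen : PySem.Set (List (String × Int))) : List (List (String × Int)) → List (List (String × Int))
  | [] => []
  | d :: rest => if seen.contains d then aDedup seen rest else d :: aDedup (seen.add d) rest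

def celuleDeLangaSarpe (sarpe : List (List (String × Int))) : List (List (String × Int)) :=
  let cap := (PySem.List.pyGet? sarpe 0).getD []   -- sarpe[0]; IndexError (sarpe = []) excluded by Pre_
  let capX := dget cap "x"
  let capY := dget cap "y"
  aDedup PySem.Set.empty (aCollect capX capY sarpe.length sarpe 0)

-- ===== PORT B =====
def pvOffsets : List (Int × Int) := [(1,0),(-1,0),(0,1),(0,-1),(1,1),(-1,-1),(-1,1),(1,-1)]

-- B's while loop: take the head, append it, filter its duplicates out of the remainder
def bNub (out : List (List (String × Int))) : List (List (String × Int)) → List (List (String × Int))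
  | [] => out
  | h :: t => bNub (out ++ [h]) (t.filter (fun d => d ≠ h))
termination_by l => l.length
decreasing_by
  simp only [List.length_cons, Nat.lt_succ_iff, List.length_unattach]
  exact le_trans (List.length_filter_le _ _) (by simp)

def celuleDeLangaSarpe_alt (sarpe : List (List (String × Int))) : List (List (String × Int)) :=
  let cap := (PySem.List.pyGet? sarpe 0).getD []   -- sarpe[0]; IndexError (sarpe = []) excluded by Pre_
  let capX := dget cap "x"
  let capY := dget cap "y"
  let n : Int := sarpe.length
  let cands := cap :: (PySem.List.enumerate sarpe).flatMap (fun p =>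
      if p.1 ≠ 0 ∧ |dget p.2 "x" - capX| + |dget p.2 "y" - capY| < n - p.1 + 1 then
        p.2 :: pvOffsets.map (fun o => [("x", dget p.2 "x" + o.1), ("y", dget p.2 "y" + o.2)])
      else [])
  bNub [] cands

-- ===== PRECONDITION & SPEC =====
-- Pre_ excludes the empty snake and segments missing an 'x' or 'y' key (A raises IndexError/KeyError there),
-- and segments whose assoc list has duplicate keys, which do not represent a Python dict.
def Pre_celuleDeLangaSarpe (sarpe : List (List (String × Int))) : Prop :=
  sarpe ≠ [] ∧ ∀ d ∈ sarpe, (d.map Prod.fst).Nodup ∧ "x" ∈ d.map Prod.fst ∧ "y" ∈ d.map Prod.fst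
instance (sarpe : List (List (String × Int))) : Decidable (Pre_celuleDeLangaSarpe sarpe) := by
  unfold Pre_celuleDeLangaSarpe; infer_instance
def pvWitness_celuleDeLangaSarpe : (List (List (String × Int))) := [[("x", 0), ("y", 0)], [("x", 1), ("y", 1)]]

def Spec_celuleDeLangaSarpe (sarpe : List (List (String × Int))) (out : List (List (String × Int))) : Prop := out = celuleDeLangaSarpe_alt sarpe
instance (sarpe : List (List (String × Int))) (out : List (List (String × Int))) : Decidable (Spec_celuleDeLangaSarpe sarpe out) := by unfold Spec_celuleDeLangaSarpe; infer_instance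

-- ===== CLAIM (what is proved, stated in full; the proofs are below) =====
def Claim_equal_celuleDeLangaSarpe : Prop := ∀ (sarpe : List (List (String × Int))), Dom_celuleDeLangaSarpe sarpe → Pre_celuleDeLangaSarpe sarpe → Spec_celuleDeLangaSarpe sarpe (celuleDeLangaSarpe sarpe)

-- ===== LEMMAS AND PROOFS =====

-- the per-segment candidate block (proof-only abstraction)
def blk (capX capY n : Int) (p : Int × List (String × Int)) : List (List (String × Int)) :=
  if p.1 ≠ 0 ∧ |dget p.2 "x" - capX| + |dget p.2 "y" - capY| < n - p.1 + 1
  then p.2 :: pvOffsets.map (fun o => [("x", dget p.2 "x" + o.1), ("y", dget p.2 "y" + o.2)]) else []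

-- A's first loop is the flatMap of per-index blocks (with the head block at index 0)
theorem aCollect_eq (capX capY n : Int) (l : List (List (String × Int))) :
    ∀ c : Int, aCollect capX capY n l c =
      (PySem.List.enumerate l c).flatMap (fun p =>
        if p.1 = 0 then [p.2] else blk capX capY n p) := by
  induction l with
  | nil => intro c; simp [aCollect, PySem.List.enumerate_nil]
  | cons each rest ih =>
    intro c
    simp only [aCollect, PySem.List.enumerate_cons, List.flatMap_cons, ih, blk]
    congr 1
    by_cases hc : c = 0
    · simp [hc]
    · simp only [hc, if_false, ne_eq, not_false_eq_true, true_and]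
      split_ifs with hd
      · simp only [pvOffsets, List.map_cons, List.map_nil]
        norm_num
        refine ⟨by ring, by ring, by ring, by ring⟩
      · rfl

-- indices ≥ 1 never take the head branch
theorem flatMap_blk_pos (capX capY n : Int) (l : List (List (String × Int))) :
    ∀ c : Int, 1 ≤ c →
      (PySem.List.enumerate l c).flatMap (fun p => if p.1 = 0 then [p.2] else blk capX capY n p)
        = (PySem.List.enumerate l c).flatMap (blk capX capY n) := by
  induction l with
  | nil => intro c _; simp [PySem.List.enumerate_nil]
  | cons each rest ih =>
    intro c hc
    have hc0 : c ≠ 0 := by omega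
    simp only [PySem.List.enumerate_cons, List.flatMap_cons, hc0, if_false, ih (c + 1) (by omega)]

-- the seen-set dedup is the nub of the list with already-seen elements filtered away
theorem bNub_eq_aDedup (L : List (List (String × Int))) :
    ∀ (s : PySem.Set (List (String × Int))) (out : List (List (String × Int))),
      bNub out (L.filter (fun d => !s.contains d)) = out ++ aDedup s L := by
  induction L with
  | nil => intro s out; rw [List.filter_nil, bNub.eq_def]; simp [aDedup]
  | cons d rest ih =>
    intro s out
    rw [List.filter_cons]
    by_cases h : s.contains d = true
    · have hm : d ∈ s := by simpa [PySem.Set.contains] using h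
      simp only [h, Bool.not_true, Bool.false_eq_true, if_false]
      rw [ih s out]
      simp [aDedup, hm]
    · have hm : d ∉ s := by simpa [PySem.Set.contains] using h
      have hadd : s.add d = s ++ [d] := by
        simp [PySem.Set.add, PySem.Set.contains, hm]
      have hfilt : ((rest.filter (fun e => !s.contains e)).filter (fun e => e ≠ d))
          = rest.filter (fun e => !(s.add d).contains e) := by
        rw [List.filter_filter]
        apply List.filter_congr
        intro e _
        simp [hadd, PySem.Set.contains, Bool.and_comm]
      simp only [h, Bool.not_false, if_true]
      rw [bNub.eq_def]
      simp only []
      rw [hfilt, ih (s.add d) (out ++ [d])]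
      simp [aDedup, hm]

theorem celuleDeLangaSarpe_eq_alt (sarpe : List (List (String × Int))) (hne : sarpe ≠ []) :
    celuleDeLangaSarpe sarpe = celuleDeLangaSarpe_alt sarpe := by
  obtain ⟨h, t, rfl⟩ : ∃ h t, sarpe = h :: t := by
    cases sarpe with
    | nil => exact absurd rfl hne
    | cons h t => exact ⟨h, t, rfl⟩
  have hget : (PySem.List.pyGet? (h :: t) 0).getD [] = h := by
    simp [PySem.List.pyGet?, PySem.List.pyIdx?]
  unfold celuleDeLangaSarpe celuleDeLangaSarpe_alt
  simp only [hget]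
  rw [aCollect_eq]
  set capX := dget h "x"
  set capY := dget h "y"
  set n : Int := ((h :: t).length : Int)
  have hcands : (PySem.List.enumerate (h :: t) 0).flatMap (fun p =>
      if p.1 ≠ 0 ∧ |dget p.2 "x" - capX| + |dget p.2 "y" - capY| < n - p.1 + 1 then
        p.2 :: pvOffsets.map (fun o => [("x", dget p.2 "x" + o.1), ("y", dget p.2 "y" + o.2)])
      else [])
      = (PySem.List.enumerate t 1).flatMap (blk capX capY n) := by
    simp only [PySem.List.enumerate_cons, List.flatMap_cons]
    have h0 : (if (0:Int) ≠ 0 ∧ |dget h "x" - capX| + |dget h "y" - capY| < n - 0 + 1 then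
        h :: pvOffsets.map (fun o => [("x", dget h "x" + o.1), ("y", dget h "y" + o.2)]) else []) = [] := by
      simp
    rw [h0]
    simp only [List.nil_append]
    apply List.flatMap_congr
    intro p _
    rfl
  have hA : aDedup PySem.Set.empty ((PySem.List.enumerate (h :: t) 0).flatMap
      (fun p => if p.1 = 0 then [p.2] else blk capX capY n p))
      = aDedup PySem.Set.empty (h :: (PySem.List.enumerate t 1).flatMap (blk capX capY n)) := by
    simp only [PySem.List.enumerate_cons, List.flatMap_cons]
    norm_num
    rw [flatMap_blk_pos _ _ _ t 1 (le_refl 1)]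
  rw [hA, hcands]
  have hfilt : ((h :: (PySem.List.enumerate t 1).flatMap (blk capX capY n)).filter
      (fun d => !(PySem.Set.empty : PySem.Set (List (String × Int))).contains d))
      = h :: (PySem.List.enumerate t 1).flatMap (blk capX capY n) := by
    apply List.filter_eq_self.mpr
    intro a _
    simp [PySem.Set.empty, PySem.Set.contains]
  have := bNub_eq_aDedup (h :: (PySem.List.enumerate t 1).flatMap (blk capX capY n))
      PySem.Set.empty []
  rw [hfilt] at this
  simpa using this.symm

-- ===== VERDICT (by name: the statement is the Claim_ definition above) =====
theorem celuleDeLangaSarpe_spec : Claim_equal_celuleDeLangaSarpe := by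
  intro sarpe _ hpre
  unfold Spec_celuleDeLangaSarpe
  exact celuleDeLangaSarpe_eq_alt sarpe hpre.1
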